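-- pv_equiv track=rewrite | github.com/verivital/behaverify | src/behaverify/variations/unused/depth/behaverify_to_smv.py | calculate_parallel_depth
-- ===== SOURCE A (Python) =====
-- def calculate_parallel_depth(nodes, node):
--     return (
--         0 if node['parent'] is None else (
--             (calculate_parallel_depth(nodes, nodes[node['parent']]) + 1) if 'parallel' in nodes[node['parent']]['type'] else (
--                 calculate_parallel_depth(nodes, nodes[node['parent']])
--             )
--         )
--     )
-- ===== SOURCE B (Python) =====
-- def calculate_parallel_depth(nodes, node):
--     count = 0
--     current = node
--     while current['parent'] is not None:
--         current = nodes[current['parent']]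
--         if 'parallel' in current['type']:
--             count += 1
--     return count
-- ===== Notes on version B (the rewrite author's own statement) =====
-- stated objective: simpler
-- what changed: Replaces the recursive descent over the parent chain with an explicit iterative walk that maintains a running count, avoiding the call stack entirely.
import Mathlib
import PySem

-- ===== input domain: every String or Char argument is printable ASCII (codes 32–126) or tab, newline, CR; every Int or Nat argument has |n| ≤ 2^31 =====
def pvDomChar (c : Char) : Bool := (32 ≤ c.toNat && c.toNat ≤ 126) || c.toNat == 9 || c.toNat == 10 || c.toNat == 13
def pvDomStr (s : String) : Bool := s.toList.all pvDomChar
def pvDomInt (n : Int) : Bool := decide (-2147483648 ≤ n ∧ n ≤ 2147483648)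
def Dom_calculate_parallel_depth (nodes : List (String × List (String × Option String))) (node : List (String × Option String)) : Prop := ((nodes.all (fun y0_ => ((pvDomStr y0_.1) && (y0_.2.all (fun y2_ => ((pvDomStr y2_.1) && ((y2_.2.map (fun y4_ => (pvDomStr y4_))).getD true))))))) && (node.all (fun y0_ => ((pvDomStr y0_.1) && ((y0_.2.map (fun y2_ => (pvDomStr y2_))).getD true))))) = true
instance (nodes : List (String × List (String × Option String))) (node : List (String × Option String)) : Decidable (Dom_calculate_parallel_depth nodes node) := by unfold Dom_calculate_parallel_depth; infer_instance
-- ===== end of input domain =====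

-- B replaces A's recursion over the parent chain with an explicit iterative walk carrying a running count (simpler decomposition, same cost).

-- ===== PORT A =====
-- A's recursion is structural on the parent chain; the fuel nodes.length + 1 is an upper
-- bound on the length of any terminating chain (Pre_ guarantees it is never exhausted).
def calcA_depth (nodes : List (String × List (String × Option String))) : Nat → List (String × Option String) → Int
  | 0, _ => 0
  | n + 1, node =>
    match (PySem.Dict.mk node).get? "parent" with
    | some none => 0
    | some (some p) =>
      match (PySem.Dict.mk nodes).get? p with
      | some parent =>
        match (PySem.Dict.mk parent).get? "type" with
        | some (some t) =>
          if PySem.Str.isIn "parallel" t then calcA_depth nodes n parent + 1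
          else calcA_depth nodes n parent
        | _ => 0   -- TypeError / KeyError in Python: excluded by Pre_
      | none => 0  -- KeyError: excluded by Pre_
    | none => 0    -- KeyError: excluded by Pre_

def calculate_parallel_depth (nodes : List (String × List (String × Option String))) (node : List (String × Option String)) : Int :=
  calcA_depth nodes (nodes.length + 1) node

-- ===== PORT B =====
-- one step of the while loop: the parent node, if any
def stepB (nodes : List (String × List (String × Option String))) (cur : List (String × Option String)) : Option (List (String × Option String)) :=
  match (PySem.Dict.mk cur).get? "parent" with
  | some (some p) => (PySem.Dict.mk nodes).get? p
  | _ => none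

-- the increment contributed by one visited parent
def parB (parent : List (String × Option String)) : Int :=
  match (PySem.Dict.mk parent).get? "type" with
  | some (some t) => if PySem.Str.isIn "parallel" t then 1 else 0
  | _ => 0

def loopB (nodes : List (String × List (String × Option String))) : Nat → List (String × Option String) → Int → Int
  | 0, _, count => count
  | n + 1, cur, count =>
    match stepB nodes cur with
    | none => count
    | some parent => loopB nodes n parent (count + parB parent)

def calculate_parallel_depth_alt (nodes : List (String × List (String × Option String))) (node : List (String × Option String)) : Int :=
  loopB nodes (nodes.length + 1) node 0

-- ===== PRECONDITION & SPEC =====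
-- chainOkB walks the parent chain of the input (it computes no depth): every visited node has a
-- "parent" key, every named parent is present in nodes with a string "type", and the chain reaches
-- a None parent within the fuel.  A terminating chain visits each first-match key at most once
-- (else it cycles), so fuel nodes.length + 1 is exact.
def chainOkB (nodes : List (String × List (String × Option String))) : Nat → List (String × Option String) → Bool
  | 0, _ => false
  | n + 1, cur =>
    match (PySem.Dict.mk cur).get? "parent" with
    | some none => true
    | some (some p) =>
      match (PySem.Dict.mk nodes).get? p with
      | some parent =>
        (match (PySem.Dict.mk parent).get? "type" with
         | some (some _) => true
         | _ => false) && chainOkB nodes n parent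
      | none => false
    | none => false

-- Pre_ excludes exactly the inputs on which A raises: a missing "parent"/"type" key (KeyError),
-- a parent name absent from nodes (KeyError), a non-string "type" (TypeError), or a parent
-- chain that never reaches None (infinite recursion).
def Pre_calculate_parallel_depth (nodes : List (String × List (String × Option String))) (node : List (String × Option String)) : Prop :=
  chainOkB nodes (nodes.length + 1) node = true
instance (nodes : List (String × List (String × Option String))) (node : List (String × Option String)) : Decidable (Pre_calculate_parallel_depth nodes node) := by unfold Pre_calculate_parallel_depth; infer_instance

def pvWitness_calculate_parallel_depth : (List (String × List (String × Option String))) × (List (String × Option String)) :=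
  ([("r", [("parent", none), ("type", some "parallel")])], [("parent", some "r"), ("type", some "leaf")])

def Spec_calculate_parallel_depth (nodes : List (String × List (String × Option String))) (node : List (String × Option String)) (out : Int) : Prop := out = calculate_parallel_depth_alt nodes node
instance (nodes : List (String × List (String × Option String))) (node : List (String × Option String)) (out : Int) : Decidable (Spec_calculate_parallel_depth nodes node out) := by unfold Spec_calculate_parallel_depth; infer_instance

-- ===== CLAIM (what is proved, stated in full; the proofs are below) =====
def Claim_equal_calculate_parallel_depth : Prop := ∀ (nodes : List (String × List (String × Option String))) (node : List (String × Option String)), Dom_calculate_parallel_depth nodes node → Pre_calculate_parallel_depth nodes node → Spec_calculate_parallel_depth nodes node (calculate_parallel_depth nodes node)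

-- ===== LEMMAS AND PROOFS =====

-- loop invariant: along an OK chain, the iterative walk adds A's recursive depth to the accumulator
theorem loopB_eq_calcA (nodes : List (String × List (String × Option String))) :
    ∀ (n : Nat) (node : List (String × Option String)) (count : Int),
      chainOkB nodes n node = true → loopB nodes n node count = count + calcA_depth nodes n node := by
  intro n
  induction n with
  | zero => intro node count h; simp [chainOkB] at h
  | succ n ih =>
    intro node count h
    simp only [chainOkB] at h
    simp only [loopB, stepB, calcA_depth]
    cases hpar : (PySem.Dict.mk node).get? "parent" with
    | none => simp [hpar] at h
    | some o =>
      simp only [hpar] at h ⊢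
      cases o with
      | none => simp
      | some p =>
        simp only at h ⊢
        cases hp : (PySem.Dict.mk nodes).get? p with
        | none => simp [hp] at h
        | some parent =>
          simp only [hp] at h ⊢
          cases ht : (PySem.Dict.mk parent).get? "type" with
          | none => simp [ht] at h
          | some tv =>
            cases tv with
            | none => simp [ht] at h
            | some t =>
              simp only [ht, Bool.true_and] at h
              rw [ih parent (count + parB parent) h]
              simp only [parB, ht]
              split_ifs <;> ring

-- ===== VERDICT (by name: the statement is the Claim_ definition above) =====
theorem calculate_parallel_depth_spec : Claim_equal_calculate_parallel_depth := by
  intro nodes node _ hpre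
  unfold Spec_calculate_parallel_depth calculate_parallel_depth calculate_parallel_depth_alt
  rw [loopB_eq_calcA nodes (nodes.length + 1) node 0 hpre]
  ring
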